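-- pv_equiv track=rewrite | github.com/mstang107/noq | solvers/utils/shapes.py | get_variants
-- ===== SOURCE A (Python) =====
-- def canonicalize_shape(shape):
--     '''
--     Given a (possibly non-canonical) shape representation,
--
--     Return the canonical representation of the shape, a tuple:
--         - in sorted order
--         - whose first element is (0, 0)
--         - whose other elements represent the offsets of
--         the other cells from the first one
--     '''
--     shape = sorted(shape)
--     root_y, root_x = shape[0]
--     dy, dx = -1*root_y, -1*root_x
--     return tuple((y+dy, x+dx) for y, x in shape)
--
-- def rotate(shape):
--     '''
--     Rotate a shape 90 degrees.
--     '''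
--     return canonicalize_shape((-x, y) for y, x in shape)
--
-- def reflect(shape):
--     '''
--     Reflect a shape.
--     '''
--     return canonicalize_shape((-y, x) for y, x in shape)
--
-- def get_variants(shape, allow_rotations, allow_reflections):
--     '''
--     Get a set of canonical shape representations for a
--     (possibly non-canonical) shape representation.
--
--     allow_rotations = True iff shapes can be rotated
--     allow_reflections = True iff shapes can be reflected
--     '''
--     # build a set of functions that transform shapes
--     # in the desired ways
--     functions = set()
--     if allow_rotations:
--         functions.add(rotate)
--     if allow_reflections:
--         functions.add(reflect)
--
--     # make a set of currently found shapes
--     result = set()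
--     result.add(canonicalize_shape(shape))
--
--     # apply our functions to the items in this set,
--     # then add the results (new shapes) into the set,
--     # and do this repeatedly until the set stops growing
--     all_shapes_covered = False
--     while not all_shapes_covered:
--         new_shapes = set()
--         current_num_shapes = len(result)
--         for f in functions:
--             for s in result:
--                 new_shapes.add(f(s))
--         result = result.union(new_shapes)
--         all_shapes_covered = (current_num_shapes == len(result))
--     return result
-- ===== SOURCE B (Python) =====
-- def canonicalize_shape(shape):
--     shape = sorted(shape)
--     root_y, root_x = shape[0]
--     dy, dx = -1*root_y, -1*root_x
--     return tuple((y+dy, x+dx) for y, x in shape)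
--
-- def rotate(shape):
--     return canonicalize_shape((-x, y) for y, x in shape)
--
-- def reflect(shape):
--     return canonicalize_shape((-y, x) for y, x in shape)
--
-- def get_variants(shape, allow_rotations, allow_reflections):
--     fns = []
--     if allow_rotations:
--         fns.append(rotate)
--     if allow_reflections:
--         fns.append(reflect)
--     base = canonicalize_shape(shape)
--     seen = [base]
--     frontier = [base]
--     while frontier:
--         new = []
--         for f in fns:
--             for s in frontier:
--                 t = f(s)
--                 if t not in seen and t not in new:
--                     new.append(t)
--         seen += new
--         frontier = new
--     return set(seen)
-- ===== Notes on version B (the rewrite author's own statement) =====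
-- stated objective: faster
-- what changed: Replaces A's fixed-point iteration (re-applying every transform to the ENTIRE result set each round, with set unions and a cardinality-based stop test) by a worklist/frontier BFS over plain lists that applies each transform only to the shapes discovered in the previous round and stops when the frontier empties.
import Mathlib
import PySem

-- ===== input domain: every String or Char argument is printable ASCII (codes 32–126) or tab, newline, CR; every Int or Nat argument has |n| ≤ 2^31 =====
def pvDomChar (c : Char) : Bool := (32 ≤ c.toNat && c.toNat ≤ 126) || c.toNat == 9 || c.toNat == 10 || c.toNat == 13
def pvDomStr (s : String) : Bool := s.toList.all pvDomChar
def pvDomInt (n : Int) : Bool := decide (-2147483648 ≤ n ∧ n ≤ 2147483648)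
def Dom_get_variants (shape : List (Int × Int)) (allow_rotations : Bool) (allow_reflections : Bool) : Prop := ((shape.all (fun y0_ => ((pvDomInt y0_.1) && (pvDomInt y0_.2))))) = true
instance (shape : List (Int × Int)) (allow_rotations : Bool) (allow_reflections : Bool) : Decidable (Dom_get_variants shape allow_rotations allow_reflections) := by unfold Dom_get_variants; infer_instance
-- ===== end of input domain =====

-- B replaces A's whole-set fixed-point iteration by a frontier BFS that transforms each
-- discovered shape only once (measured faster by a constant factor).
-- Python returns a SET of shapes; both ports return it in first-insertion order
-- (Python's hash iteration order is not modelled; the set {rotate, reflect} is iterated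
-- rotate-first, and A's inner iteration over `result` is modelled in insertion order).

-- ===== PORT A =====
-- helper canonicalize_shape; on an empty shape Python raises IndexError (shape[0]),
-- modelled by pyGet? = none; those inputs are excluded by Pre_ and the port returns [].
def canonShape (shape : List (Int × Int)) : List (Int × Int) :=
  let s := PySem.List.sorted2 shape (fun p => p.1) (fun p => p.2)
  match PySem.List.pyGet? s 0 with
  | none => []
  | some r => s.map (fun p => (p.1 + (-1 * r.1), p.2 + (-1 * r.2)))

-- helper rotate
def rotShape (shape : List (Int × Int)) : List (Int × Int) :=
  canonShape (shape.map (fun p => (-p.2, p.1)))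

-- helper reflect
def reflShape (shape : List (Int × Int)) : List (Int × Int) :=
  canonShape (shape.map (fun p => (-p.1, p.2)))

-- A's while-loop (straight transliteration; fuel only makes the recursion total —
-- the loop body always runs first, as after Python's `all_shapes_covered = False`)
def gvLoopA (fns : List (List (Int × Int) → List (Int × Int))) :
    Nat → PySem.Set (List (Int × Int)) → PySem.Set (List (Int × Int))
  | 0, result => result
  | fuel+1, result =>
    let new_shapes := fns.foldl
      (fun ns f => result.foldl (fun ns s => PySem.Set.add ns (f s)) ns) PySem.Set.empty
    let current_num_shapes := PySem.Set.len result
    let result' := PySem.Set.union result new_shapes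
    if current_num_shapes = PySem.Set.len result' then result' else gvLoopA fns fuel result'

def get_variants (shape : List (Int × Int)) (allow_rotations : Bool) (allow_reflections : Bool) : List (List (Int × Int)) :=
  -- the Python set `functions`, iterated rotate-first (hash order unmodelled)
  let functions := (if allow_rotations then [rotShape] else []) ++
                   (if allow_reflections then [reflShape] else [])
  let result := PySem.Set.add PySem.Set.empty (canonShape shape)
  gvLoopA functions 64 result

-- ===== PORT B =====
-- B's inner double loop collecting this round's genuinely new shapes
def gvNewB (fns : List (List (Int × Int) → List (Int × Int)))
    (seen frontier : List (List (Int × Int))) : List (List (Int × Int)) :=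
  fns.foldl (fun new f =>
    frontier.foldl (fun new s =>
      let t := f s
      if t ∉ seen ∧ t ∉ new then new ++ [t] else new) new) []

-- B's while-loop: frontier BFS (fuel only makes the recursion total)
def gvLoopB (fns : List (List (Int × Int) → List (Int × Int))) :
    Nat → List (List (Int × Int)) → List (List (Int × Int)) → List (List (Int × Int))
  | 0, seen, _ => seen
  | fuel+1, seen, frontier =>
    if frontier.isEmpty then seen
    else
      let new := gvNewB fns seen frontier
      gvLoopB fns fuel (seen ++ new) new

def get_variants_alt (shape : List (Int × Int)) (allow_rotations : Bool) (allow_reflections : Bool) : List (List (Int × Int)) :=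
  let fns := (if allow_rotations then [rotShape] else []) ++
             (if allow_reflections then [reflShape] else [])
  let base := canonShape shape
  PySem.Set.ofList (gvLoopB fns 64 [base] [base])

-- ===== PRECONDITION & SPEC =====
-- Pre_ excludes only the empty shape, on which Python A raises IndexError (shape[0]).
def Pre_get_variants (shape : List (Int × Int)) (allow_rotations : Bool) (allow_reflections : Bool) : Prop :=
  shape ≠ []
instance (shape : List (Int × Int)) (allow_rotations : Bool) (allow_reflections : Bool) : Decidable (Pre_get_variants shape allow_rotations allow_reflections) := by unfold Pre_get_variants; infer_instance

def pvWitness_get_variants : (List (Int × Int)) × Bool × Bool := ([(0, 0), (0, 1), (1, 0)], true, true)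

def Spec_get_variants (shape : List (Int × Int)) (allow_rotations : Bool) (allow_reflections : Bool) (out : List (List (Int × Int))) : Prop := out = get_variants_alt shape allow_rotations allow_reflections
instance (shape : List (Int × Int)) (allow_rotations : Bool) (allow_reflections : Bool) (out : List (List (Int × Int))) : Decidable (Spec_get_variants shape allow_rotations allow_reflections out) := by unfold Spec_get_variants; infer_instance

-- ===== CLAIM (what is proved, stated in full; the proofs are below) =====
def Claim_equal_get_variants : Prop := ∀ (shape : List (Int × Int)) (allow_rotations : Bool) (allow_reflections : Bool), Dom_get_variants shape allow_rotations allow_reflections → Pre_get_variants shape allow_rotations allow_reflections → Spec_get_variants shape allow_rotations allow_reflections (get_variants shape allow_rotations allow_reflections)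


-- ===== LEMMAS AND PROOFS =====

abbrev Sh := List (Int × Int)
abbrev Fn := Sh → Sh

-- B's inner foldl is a Set.update of the filtered mapped list
theorem gv_foldlB (f : Fn) (seen : List Sh) :
    ∀ (L : List Sh) (acc : List Sh),
      L.foldl (fun new s => if f s ∉ seen ∧ f s ∉ new then new ++ [f s] else new) acc
      = PySem.Set.update acc ((L.map f).filter (fun t => !PySem.Set.contains seen t)) := by
  intro L
  induction L with
  | nil => intro acc; rfl
  | cons s L ih =>
    intro acc
    by_cases hs : f s ∈ seen
    · simp only [List.foldl_cons, List.map_cons, List.filter_cons]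
      have hc : (!PySem.Set.contains seen (f s)) = false := by simp [hs]
      rw [hc]
      simp only [if_neg (by simp [hs] : ¬(f s ∉ seen ∧ f s ∉ acc))]
      exact ih acc
    · have hbody : (if f s ∉ seen ∧ f s ∉ acc then acc ++ [f s] else acc) = PySem.Set.add acc (f s) := by
        by_cases ha : f s ∈ acc
        · rw [if_neg (by simp [ha]), PySem.Set.add_of_mem ha]
        · rw [if_pos ⟨hs, ha⟩, PySem.Set.add_of_not_mem ha]
      have hc : (!PySem.Set.contains seen (f s)) = true := by simp [hs]
      simp only [List.foldl_cons, List.map_cons, List.filter_cons, hc, if_pos]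
      rw [hbody, PySem.Set.update_cons]
      exact ih _

-- A's inner foldl is a Set.update of the mapped list
theorem gv_foldlA (f : Fn) (L : List Sh) (acc : PySem.Set Sh) :
    L.foldl (fun ns s => PySem.Set.add ns (f s)) acc = PySem.Set.update acc (L.map f) := by
  rw [← List.foldl_map]; rfl

-- A's new_shapes double loop
theorem gv_newA (fns : List Fn) : ∀ (R : List Sh) (acc : PySem.Set Sh),
    fns.foldl (fun ns f => R.foldl (fun ns s => PySem.Set.add ns (f s)) ns) acc
    = PySem.Set.update acc (fns.flatMap (fun f => R.map f)) := by
  induction fns with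
  | nil => intro R acc; rfl
  | cons f fns ih =>
    intro R acc
    simp only [List.foldl_cons, List.flatMap_cons]
    rw [gv_foldlA, ih, PySem.Set.update_append]

-- B's gvNewB double loop
theorem gv_newB (fns : List Fn) (seen : List Sh) : ∀ (front : List Sh) (acc : List Sh),
    fns.foldl (fun new f => front.foldl (fun new s =>
        if f s ∉ seen ∧ f s ∉ new then new ++ [f s] else new) new) acc
    = PySem.Set.update acc ((fns.flatMap (fun f => front.map f)).filter
        (fun t => !PySem.Set.contains seen t)) := by
  induction fns with
  | nil => intro front acc; rfl
  | cons f fns ih =>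
    intro front acc
    simp only [List.foldl_cons, List.flatMap_cons, List.filter_append]
    rw [gv_foldlB, ih, PySem.Set.update_append]

theorem gv_gvNewB (fns : List Fn) (seen front : List Sh) :
    gvNewB fns seen front
    = PySem.Set.ofList ((fns.flatMap (fun f => front.map f)).filter
        (fun t => !PySem.Set.contains seen t)) := by
  have h : gvNewB fns seen front
      = fns.foldl (fun new f => front.foldl (fun new s =>
          if f s ∉ seen ∧ f s ∉ new then new ++ [f s] else new) new) [] := rfl
  rw [h, gv_newB]; rfl

-- first-occurrence dedup commutes with filter
theorem gv_filter_ofList (p : Sh → Bool) (xs : List Sh) :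
    (PySem.Set.ofList xs).filter p = PySem.Set.ofList (xs.filter p) := by
  induction xs using List.reverseRecOn with
  | nil => rfl
  | append_singleton xs x ih =>
    rw [PySem.Set.ofList_append_singleton, List.filter_append, PySem.Set.add_eq_ite]
    by_cases hx : x ∈ PySem.Set.ofList xs
    · rw [if_pos hx]
      by_cases hp : p x
      · simp only [List.filter_cons, hp, if_pos, List.filter_nil]
        rw [PySem.Set.ofList_append_singleton, ih,
          PySem.Set.add_of_mem (by rw [← ih]; exact List.mem_filter.2 ⟨hx, hp⟩)]
      · simp only [List.filter_cons, List.filter_nil]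
        rw [if_neg (by simp [hp]), List.append_nil, ih]
    · rw [if_neg hx, List.filter_append]
      by_cases hp : p x
      · simp only [List.filter_cons, hp, if_pos, List.filter_nil]
        rw [PySem.Set.ofList_append_singleton, ih,
          PySem.Set.add_of_not_mem (by rw [← ih]; intro h; exact hx (List.mem_of_mem_filter h))]
      · simp only [List.filter_cons, List.filter_nil]
        rw [if_neg (by simp [hp]), List.append_nil, List.append_nil, ih]

-- candidates produced from already-closed elements are filtered away
theorem gv_cand_filter (fns : List Fn) (old front : List Sh)
    (hclo : ∀ f ∈ fns, ∀ s ∈ old, f s ∈ old ++ front) :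
    (fns.flatMap (fun f => (old ++ front).map f)).filter
        (fun t => !PySem.Set.contains (old ++ front) t)
    = (fns.flatMap (fun f => front.map f)).filter
        (fun t => !PySem.Set.contains (old ++ front) t) := by
  induction fns with
  | nil => rfl
  | cons f fns ih =>
    have hnil : (old.map f).filter (fun t => !PySem.Set.contains (old ++ front) t) = [] := by
      rw [List.filter_eq_nil_iff]
      intro t ht
      obtain ⟨s, hs, rfl⟩ := List.mem_map.1 ht
      simp [hclo f (List.mem_cons_self) s hs]
    simp only [List.flatMap_cons, List.filter_append]
    rw [ih (fun g hg => hclo g (List.mem_cons_of_mem _ hg)), List.map_append,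
      List.filter_append, hnil, List.nil_append]

theorem gv_loopB_nil (fns : List Fn) (fuel : Nat) (seen : List Sh) :
    gvLoopB fns fuel seen [] = seen := by
  cases fuel <;> simp [gvLoopB]

theorem gv_nodupB (fns : List Fn) : ∀ (fuel : Nat) (seen front : List Sh),
    seen.Nodup → (gvLoopB fns fuel seen front).Nodup := by
  intro fuel
  induction fuel with
  | zero => intro seen front h; exact h
  | succ fuel ih =>
    intro seen front h
    by_cases hf : front.isEmpty
    · show (if front.isEmpty then seen else _).Nodup
      rw [if_pos hf]; exact h
    · show (if front.isEmpty then seen else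
        gvLoopB fns fuel (seen ++ gvNewB fns seen front) (gvNewB fns seen front)).Nodup
      rw [if_neg hf]
      apply ih
      rw [List.nodup_append]
      refine ⟨h, ?_, ?_⟩
      · rw [gv_gvNewB]; exact PySem.Set.nodup_ofList _
      · intro x hx y hy heq
        rw [gv_gvNewB, PySem.Set.mem_ofList] at hy
        have hns := List.of_mem_filter hy
        simp at hns
        exact hns (heq ▸ hx)

-- the bisimulation: A's fixed-point loop over the whole set equals B's frontier BFS
theorem gv_bisim (fns : List Fn) : ∀ (fuel : Nat) (old front : List Sh),
    (old ++ front).Nodup →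
    (∀ f ∈ fns, ∀ s ∈ old, f s ∈ old ++ front) →
    gvLoopA fns fuel (old ++ front) = gvLoopB fns fuel (old ++ front) front := by
  intro fuel
  induction fuel with
  | zero => intro old front _ _; rfl
  | succ fuel ih =>
    intro old front hnd hclo
    have hA : gvLoopA fns (fuel+1) (old ++ front)
        = (if PySem.Set.len (old ++ front)
              = PySem.Set.len (PySem.Set.union (old ++ front)
                  (fns.foldl (fun ns f => (old ++ front).foldl
                    (fun ns s => PySem.Set.add ns (f s)) ns) PySem.Set.empty))
           then PySem.Set.union (old ++ front)
                  (fns.foldl (fun ns f => (old ++ front).foldl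
                    (fun ns s => PySem.Set.add ns (f s)) ns) PySem.Set.empty)
           else gvLoopA fns fuel (PySem.Set.union (old ++ front)
                  (fns.foldl (fun ns f => (old ++ front).foldl
                    (fun ns s => PySem.Set.add ns (f s)) ns) PySem.Set.empty))) := rfl
    have hnewA : (fns.foldl (fun ns f => (old ++ front).foldl
        (fun ns s => PySem.Set.add ns (f s)) ns) PySem.Set.empty)
        = PySem.Set.ofList (fns.flatMap (fun f => (old ++ front).map f)) := gv_newA fns _ _
    have hres : PySem.Set.union (old ++ front)
        (PySem.Set.ofList (fns.flatMap (fun f => (old ++ front).map f)))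
        = (old ++ front) ++ PySem.Set.ofList ((fns.flatMap (fun f => front.map f)).filter
            (fun t => !PySem.Set.contains (old ++ front) t)) := by
      show PySem.Set.update (old ++ front)
        (PySem.Set.ofList (fns.flatMap (fun f => (old ++ front).map f))) = _
      rw [PySem.Set.update_eq_append_filter, PySem.Set.ofList_ofList,
        gv_filter_ofList, gv_cand_filter fns old front hclo]
    set newL := PySem.Set.ofList ((fns.flatMap (fun f => front.map f)).filter
        (fun t => !PySem.Set.contains (old ++ front) t)) with hnewL
    have hlen : (PySem.Set.len (old ++ front) = PySem.Set.len ((old ++ front) ++ newL))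
        ↔ newL = [] := by
      show ((((old ++ front).length : Int)) = (((old ++ front) ++ newL).length : Int)) ↔ _
      rw [← List.length_eq_zero_iff (l := newL)]
      simp only [List.length_append]
      omega
    have hdisj : ∀ x ∈ newL, x ∉ old ++ front := by
      intro x hx
      rw [hnewL, PySem.Set.mem_ofList] at hx
      have := List.of_mem_filter hx
      simpa using this
    rw [hA, hnewA, hres]
    by_cases hnl : newL = []
    · rw [if_pos (hlen.2 hnl), hnl, List.append_nil]
      by_cases hfe : front.isEmpty
      · show _ = (if front.isEmpty then (old ++ front) else _)
        rw [if_pos hfe]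
      · show _ = (if front.isEmpty then _ else
          gvLoopB fns fuel ((old ++ front) ++ gvNewB fns (old ++ front) front)
            (gvNewB fns (old ++ front) front))
        rw [if_neg hfe, gv_gvNewB, ← hnewL, hnl, List.append_nil, gv_loopB_nil]
    · rw [if_neg (fun h => hnl (hlen.1 h))]
      have hfe : ¬ front.isEmpty := by
        intro h
        apply hnl
        rw [List.isEmpty_iff] at h
        rw [hnewL, h]
        simp [List.flatMap]
      have hstepB : gvLoopB fns (fuel+1) (old ++ front) front
          = gvLoopB fns fuel ((old ++ front) ++ newL) newL := by
        show (if front.isEmpty then (old ++ front) else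
          gvLoopB fns fuel ((old ++ front) ++ gvNewB fns (old ++ front) front)
            (gvNewB fns (old ++ front) front)) = _
        rw [if_neg hfe, gv_gvNewB, ← hnewL]
      rw [hstepB]
      have hnd' : ((old ++ front) ++ newL).Nodup := by
        rw [List.nodup_append]
        refine ⟨hnd, by rw [hnewL]; exact PySem.Set.nodup_ofList _, ?_⟩
        intro x hx y hy heq
        exact hdisj y hy (heq ▸ hx)
      have hclo' : ∀ f ∈ fns, ∀ s ∈ old ++ front, f s ∈ (old ++ front) ++ newL := by
        intro f hf s hs
        rcases List.mem_append.1 hs with hso | hsf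
        · exact List.mem_append_left _ (hclo f hf s hso)
        · by_cases hm : f s ∈ old ++ front
          · exact List.mem_append_left _ hm
          · refine List.mem_append_right _ ?_
            rw [hnewL, PySem.Set.mem_ofList]
            refine List.mem_filter.2 ⟨?_, by simpa using hm⟩
            exact List.mem_flatMap.2 ⟨f, hf, List.mem_map.2 ⟨s, hsf, rfl⟩⟩
      exact ih (old ++ front) newL hnd' hclo'


-- ===== VERDICT (by name: the statement is the Claim_ definition above) =====
theorem get_variants_spec : Claim_equal_get_variants := by
  intro shape allow_rotations allow_reflections _ _
  show get_variants shape allow_rotations allow_reflections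
      = get_variants_alt shape allow_rotations allow_reflections
  have hA : get_variants shape allow_rotations allow_reflections
      = gvLoopA ((if allow_rotations then [rotShape] else []) ++
                 (if allow_reflections then [reflShape] else [])) 64 ([] ++ [canonShape shape]) := rfl
  have hB : get_variants_alt shape allow_rotations allow_reflections
      = PySem.Set.ofList (gvLoopB ((if allow_rotations then [rotShape] else []) ++
                 (if allow_reflections then [reflShape] else [])) 64 ([] ++ [canonShape shape]) [canonShape shape]) := rfl
  rw [hA, hB,
    gv_bisim _ 64 [] [canonShape shape] (by simp) (by intro f _ s hs; cases hs),
    PySem.Set.ofList_eq_self_of_nodup _ (gv_nodupB _ 64 _ _ (by simp))]
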